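-- pv_equiv track=rewrite | github.com/vedpatel-10/LAB-9 | Q-2.6.py | list_sanitizer
-- ===== SOURCE A (Python) =====
-- def list_sanitizer(lst,i=0):
--     if i == len(lst)-1:
--         if lst[i]> 0:
--             return [lst[i]]
--         elif lst[i]<=0:
--             return [0]
--
--     if lst[i]> 0:
--         return [lst[i]] + list_sanitizer(lst,i+1)
--     elif lst[i]<=0:
--         return [0] + list_sanitizer(lst,i+1)
-- ===== SOURCE B (Python) =====
-- def list_sanitizer(lst, i=0):
--     # single comprehension over the index range instead of index recursion
--     return [lst[j] if lst[j] > 0 else 0 for j in range(i, len(lst))]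
-- ===== Notes on version B (the rewrite author's own statement) =====
-- stated objective: idiomatic
-- what changed: Index recursion with list concatenation at every step is replaced by a single list comprehension over range(i, len(lst)).
import Mathlib
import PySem

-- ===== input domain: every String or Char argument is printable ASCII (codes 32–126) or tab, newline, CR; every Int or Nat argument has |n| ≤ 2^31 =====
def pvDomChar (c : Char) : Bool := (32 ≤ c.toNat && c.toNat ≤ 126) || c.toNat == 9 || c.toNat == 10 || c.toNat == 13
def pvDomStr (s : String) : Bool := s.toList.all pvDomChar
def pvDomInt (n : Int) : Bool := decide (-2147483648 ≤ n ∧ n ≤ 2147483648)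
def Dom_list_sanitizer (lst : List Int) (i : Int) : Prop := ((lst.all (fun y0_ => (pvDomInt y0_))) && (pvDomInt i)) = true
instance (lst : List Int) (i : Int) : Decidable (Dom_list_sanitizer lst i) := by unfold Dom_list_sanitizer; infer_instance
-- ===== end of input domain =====

-- B replaces A's index recursion (with repeated list concatenation) by one comprehension over range(i, len(lst)).


-- ===== PORT A =====
-- A's recursion, made total with a fuel counter (enough fuel is supplied at the top;
-- pyGet? = none is where the Python raises IndexError, excluded by Pre_ — we return [] there).
def listSanitizerGoA (lst : List Int) (i : Int) : Nat → List Int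
  | 0 => []
  | fuel + 1 =>
    if i = (lst.length : Int) - 1 then
      match PySem.List.pyGet? lst i with
      | none => []
      | some x => if x > 0 then [x] else [0]
    else
      match PySem.List.pyGet? lst i with
      | none => []
      | some x => (if x > 0 then [x] else [0]) ++ listSanitizerGoA lst (i + 1) fuel

def list_sanitizer (lst : List Int) (i : Int) : List Int :=
  listSanitizerGoA lst i (((lst.length : Int) - i).toNat + 1)

-- ===== PORT B =====
-- Source B's comprehension: [lst[j] if lst[j] > 0 else 0 for j in range(i, len(lst))].
-- pyGetD's default is never used inside Pre_ (every j in the range is a valid index).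
def list_sanitizer_alt (lst : List Int) (i : Int) : List Int :=
  (PySem.List.pyRange i (lst.length : Int) 1).map
    (fun j => let x := PySem.List.pyGetD lst j 0; if x > 0 then x else 0)

-- ===== PRECONDITION & SPEC =====
-- A raises IndexError on the empty list, on i ≥ len(lst) and on i < -len(lst); exactly those are excluded.
def Pre_list_sanitizer (lst : List Int) (i : Int) : Prop :=
  lst ≠ [] ∧ -(lst.length : Int) ≤ i ∧ i ≤ (lst.length : Int) - 1

instance (lst : List Int) (i : Int) : Decidable (Pre_list_sanitizer lst i) := by
  unfold Pre_list_sanitizer; infer_instance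

def pvWitness_list_sanitizer : List Int × Int := ([3, -1, 0, 7], 1)

def Spec_list_sanitizer (lst : List Int) (i : Int) (out : List Int) : Prop := out = list_sanitizer_alt lst i
instance (lst : List Int) (i : Int) (out : List Int) : Decidable (Spec_list_sanitizer lst i out) := by unfold Spec_list_sanitizer; infer_instance

-- ===== CLAIM (what is proved, stated in full; the proofs are below) =====
def Claim_equal_list_sanitizer : Prop := ∀ (lst : List Int) (i : Int), Dom_list_sanitizer lst i → Pre_list_sanitizer lst i → Spec_list_sanitizer lst i (list_sanitizer lst i)

-- ===== LEMMAS AND PROOFS =====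

-- Main invariant: with enough fuel, A's recursion from index i produces B's mapped range.
theorem listSanitizerGoA_eq (lst : List Int) (i : Int) (fuel : Nat)
    (hlo : -(lst.length : Int) ≤ i) (hhi : i ≤ (lst.length : Int) - 1)
    (hf : ((lst.length : Int) - i).toNat ≤ fuel) :
    listSanitizerGoA lst i fuel =
      (PySem.List.pyRange i (lst.length : Int) 1).map
        (fun j => let x := PySem.List.pyGetD lst j 0; if x > 0 then x else 0) := by
  induction fuel generalizing i with
  | zero => omega
  | succ fuel ih =>
    have hget : PySem.List.pyGet? lst i = some (PySem.List.pyGetD lst i 0) := by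
      have hin : PySem.Raise.InRange lst.length i := by
        simp [PySem.Raise.InRange]; omega
      cases hx : PySem.List.pyGet? lst i with
      | none => exact absurd ((PySem.List.pyGet?_eq_none_iff lst i).mp hx) (not_not_intro hin)
      | some x => simp [PySem.List.pyGetD, hx]
    rw [PySem.List.pyRange_one_cons (by omega)]
    by_cases hlast : i = (lst.length : Int) - 1
    · have : PySem.List.pyRange (i + 1) (lst.length : Int) 1 = [] :=
        PySem.List.pyRange_one_eq_nil (by omega)
      simp only [listSanitizerGoA, if_pos hlast, hget, this, List.map_cons, List.map_nil]
      split <;> simp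
    · simp only [listSanitizerGoA, if_neg hlast, hget,
        ih (i + 1) (by omega) (by omega) (by omega), List.map_cons]
      split <;> simp

-- ===== VERDICT (by name: the statement is the Claim_ definition above) =====
theorem list_sanitizer_spec : Claim_equal_list_sanitizer := by
  intro lst i _ hpre
  obtain ⟨hne, hlo, hhi⟩ := hpre
  unfold Spec_list_sanitizer list_sanitizer list_sanitizer_alt
  exact listSanitizerGoA_eq lst i _ hlo hhi (by omega)
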